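-- pv_equiv track=rewrite | github.com/MiltFra/AoC2020 | src/day24_2.py | to_cubic
-- ===== SOURCE A (Python) =====
-- def go_e(p):
--     x, y, z = p
--     return x + 1, y - 1, z
--
-- def go_w(p):
--     x, y, z = p
--     return x - 1, y + 1, z
--
-- def go_ne(p):
--     x, y, z = p
--     return x + 1, y, z - 1
--
-- def go_nw(p):
--     x, y, z = p
--     return x, y + 1, z - 1
--
-- def go_se(p):
--     x, y, z = p
--     return x, y - 1, z + 1
--
-- def go_sw(p):
--     x, y, z = p
--     return x - 1, y, z + 1
--
-- def to_cubic(l):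
--     p = (0, 0, 0)
--     last = ''
--     for c in l:
--         if c == 's' or c == 'n':
--             last = c
--             continue
--         d = last + c
--         last = ''
--         if d == 'e':
--             p = go_e(p)
--         elif d == 'w':
--             p = go_w(p)
--         elif d == 'ne':
--             p = go_ne(p)
--         elif d == 'nw':
--             p = go_nw(p)
--         elif d == 'se':
--             p = go_se(p)
--         elif d == 'sw':
--             p = go_sw(p)
--     return p
-- ===== SOURCE B (Python) =====
-- def to_cubic(l):
--     toks = [(p if p in 'ns' else '') + c for p, c in zip(' ' + l, l) if c in 'ew']
--     e, w = toks.count('e'), toks.count('w')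
--     ne, nw = toks.count('ne'), toks.count('nw')
--     se, sw = toks.count('se'), toks.count('sw')
--     return (e + ne - w - sw, w + nw - e - se, se + sw - ne - nw)
-- ===== Notes on version B (the rewrite author's own statement) =====
-- stated objective: alternative
-- what changed: Replaced A's single-pass state machine (buffered 'n'/'s' prefix, six move helpers updating the point step by step) with staged passes: pair each character with its predecessor via zip, build the token list, count the six token kinds, and return one closed-form linear combination of the counts. (fewer Python-level operations per character: comprehension tokenization plus C-level list.count instead of per-character branching and tuple rebuilds).
import Mathlib
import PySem

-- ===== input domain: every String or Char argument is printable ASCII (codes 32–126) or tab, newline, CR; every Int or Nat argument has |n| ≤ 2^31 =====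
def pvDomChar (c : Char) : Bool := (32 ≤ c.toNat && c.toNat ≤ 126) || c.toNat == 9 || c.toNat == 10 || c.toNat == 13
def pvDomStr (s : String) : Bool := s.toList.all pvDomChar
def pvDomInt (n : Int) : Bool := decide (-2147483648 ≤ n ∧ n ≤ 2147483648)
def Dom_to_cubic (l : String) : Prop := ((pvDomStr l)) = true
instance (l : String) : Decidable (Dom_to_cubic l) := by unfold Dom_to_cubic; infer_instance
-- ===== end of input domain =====

-- B replaces A's per-step state machine (buffered prefix + six move helpers mutating the
-- point) with staged passes: tokenize by zipping each char with its predecessor, count the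
-- six token kinds, and return one closed-form linear combination of the counts (same O(n)).


-- ===== PORT A =====
-- the 'last' string variable (values '', 'n', 's') is represented by its character list
def go_e (p : Int × Int × Int) : Int × Int × Int := (p.1 + 1, p.2.1 - 1, p.2.2)
def go_w (p : Int × Int × Int) : Int × Int × Int := (p.1 - 1, p.2.1 + 1, p.2.2)
def go_ne (p : Int × Int × Int) : Int × Int × Int := (p.1 + 1, p.2.1, p.2.2 - 1)
def go_nw (p : Int × Int × Int) : Int × Int × Int := (p.1, p.2.1 + 1, p.2.2 - 1)
def go_se (p : Int × Int × Int) : Int × Int × Int := (p.1, p.2.1 - 1, p.2.2 + 1)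
def go_sw (p : Int × Int × Int) : Int × Int × Int := (p.1 - 1, p.2.1, p.2.2 + 1)

-- A's for-loop over the characters, state (p, last)
def toCubicLoop : List Char → (Int × Int × Int) → List Char → Int × Int × Int
  | [], p, _ => p
  | c :: rest, p, last =>
    if c = 's' ∨ c = 'n' then toCubicLoop rest p [c]
    else
      let d := last ++ [c]
      if d = ['e'] then toCubicLoop rest (go_e p) []
      else if d = ['w'] then toCubicLoop rest (go_w p) []
      else if d = ['n','e'] then toCubicLoop rest (go_ne p) []
      else if d = ['n','w'] then toCubicLoop rest (go_nw p) []
      else if d = ['s','e'] then toCubicLoop rest (go_se p) []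
      else if d = ['s','w'] then toCubicLoop rest (go_sw p) []
      else toCubicLoop rest p []

def to_cubic (l : String) : Int × Int × Int := toCubicLoop l.toList (0, 0, 0) []

-- ===== PORT B =====
-- Python strings/tokens are represented by their character lists; zip(' ' + l, l) pairs
-- each character with its predecessor (a space in front of the first).
def toCubicToks (l : String) : List (List Char) :=
  ((' ' :: l.toList).zip l.toList).filterMap
    (fun pc => if pc.2 = 'e' ∨ pc.2 = 'w' then
        some ((if pc.1 = 'n' ∨ pc.1 = 's' then [pc.1] else []) ++ [pc.2])
      else none)

def to_cubic_alt (l : String) : Int × Int × Int :=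
  let toks := toCubicToks l
  let e : Int := PySem.List.count toks ['e']
  let w : Int := PySem.List.count toks ['w']
  let ne : Int := PySem.List.count toks ['n','e']
  let nw : Int := PySem.List.count toks ['n','w']
  let se : Int := PySem.List.count toks ['s','e']
  let sw : Int := PySem.List.count toks ['s','w']
  (e + ne - w - sw, w + nw - e - se, se + sw - ne - nw)

-- ===== PRECONDITION & SPEC =====
def Spec_to_cubic (l : String) (out : Int × Int × Int) : Prop := out = to_cubic_alt l
instance (l : String) (out : Int × Int × Int) : Decidable (Spec_to_cubic l out) := by unfold Spec_to_cubic; infer_instance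

-- ===== CLAIM (what is proved, stated in full; the proofs are below) =====
def Claim_equal_to_cubic : Prop := ∀ (l : String), Dom_to_cubic l → Spec_to_cubic l (to_cubic l)

-- ===== LEMMAS AND PROOFS =====

-- proof helpers: the token stream from an arbitrary predecessor char, and the point
-- obtained from an offset plus the count combination
def pvToksFrom (p : Char) (cs : List Char) : List (List Char) :=
  ((p :: cs).zip cs).filterMap
    (fun pc => if pc.2 = 'e' ∨ pc.2 = 'w' then
        some ((if pc.1 = 'n' ∨ pc.1 = 's' then [pc.1] else []) ++ [pc.2])
      else none)

def pvVal (t : List (List Char)) (x y z : Int) : Int × Int × Int :=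
  let e : Int := PySem.List.count t ['e']
  let w : Int := PySem.List.count t ['w']
  let ne : Int := PySem.List.count t ['n','e']
  let nw : Int := PySem.List.count t ['n','w']
  let se : Int := PySem.List.count t ['s','e']
  let sw : Int := PySem.List.count t ['s','w']
  (x + e + ne - w - sw, y + w + nw - e - se, z + se + sw - ne - nw)

theorem pvToksFrom_cons (p c : Char) (rest : List Char) :
    pvToksFrom p (c :: rest) =
      (if c = 'e' ∨ c = 'w' then
        [(if p = 'n' ∨ p = 's' then [p] else []) ++ [c]] else []) ++ pvToksFrom c rest := by
  by_cases h : c = 'e' ∨ c = 'w' <;>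
    simp [pvToksFrom, List.zip_cons_cons, h]

set_option maxHeartbeats 1000000 in
theorem pvVal_cons (t0 : List Char) (t : List (List Char)) (x y z : Int) :
    pvVal (t0 :: t) x y z =
      pvVal t
        (x + (if t0 = ['e'] then 1 else 0) + (if t0 = ['n','e'] then 1 else 0)
           - (if t0 = ['w'] then 1 else 0) - (if t0 = ['s','w'] then 1 else 0))
        (y + (if t0 = ['w'] then 1 else 0) + (if t0 = ['n','w'] then 1 else 0)
           - (if t0 = ['e'] then 1 else 0) - (if t0 = ['s','e'] then 1 else 0))
        (z + (if t0 = ['s','e'] then 1 else 0) + (if t0 = ['s','w'] then 1 else 0)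
           - (if t0 = ['n','e'] then 1 else 0) - (if t0 = ['n','w'] then 1 else 0)) := by
  simp only [pvVal, PySem.List.count_eq, List.count_cons, Prod.mk.injEq]
  push_cast
  refine ⟨?_, ?_, ?_⟩ <;> split_ifs <;> simp_all <;> ring

theorem pv_loop_eq : ∀ (cs : List Char) (p : Char) (x y z : Int),
    toCubicLoop cs (x, y, z) (if p = 'n' ∨ p = 's' then [p] else []) =
      pvVal (pvToksFrom p cs) x y z := by
  intro cs
  induction cs with
  | nil =>
    intro p x y z
    simp [toCubicLoop, pvToksFrom, pvVal]
  | cons c rest ih =>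
    intro p x y z
    rw [pvToksFrom_cons]
    by_cases hns : c = 's' ∨ c = 'n'
    · have hcew : ¬ (c = 'e' ∨ c = 'w') := by rcases hns with rfl | rfl <;> simp
      have hA : toCubicLoop (c :: rest) (x, y, z) (if p = 'n' ∨ p = 's' then [p] else []) =
          toCubicLoop rest (x, y, z) [c] := by
        simp [toCubicLoop, hns]
      rw [hA, if_neg hcew, List.nil_append]
      have h1 : [c] = (if c = 'n' ∨ c = 's' then [c] else []) := by rw [if_pos hns.symm]
      rw [h1, ih c x y z]
    · obtain ⟨hs, hn⟩ := not_or.mp hns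
      by_cases hew : c = 'e' ∨ c = 'w'
      · rw [if_pos hew, List.singleton_append, pvVal_cons]
        rcases hew with rfl | rfl
        · by_cases hp : p = 'n' ∨ p = 's'
          · rcases hp with rfl | rfl
            · have h2 := ih 'e' (x + 1) y (z - 1)
              rw [if_neg (by simp)] at h2
              simp [toCubicLoop, go_ne, h2]
            · have h2 := ih 'e' x (y - 1) (z + 1)
              rw [if_neg (by simp)] at h2
              simp [toCubicLoop, go_se, h2]
          · obtain ⟨hpn, hps⟩ := not_or.mp hp
            have h2 := ih 'e' (x + 1) (y - 1) z
            rw [if_neg (by simp)] at h2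
            simp [toCubicLoop, go_e, hpn, hps, h2]
        · by_cases hp : p = 'n' ∨ p = 's'
          · rcases hp with rfl | rfl
            · have h2 := ih 'w' x (y + 1) (z - 1)
              rw [if_neg (by simp)] at h2
              simp [toCubicLoop, go_nw, h2]
            · have h2 := ih 'w' (x - 1) y (z + 1)
              rw [if_neg (by simp)] at h2
              simp [toCubicLoop, go_sw, h2]
          · obtain ⟨hpn, hps⟩ := not_or.mp hp
            have h2 := ih 'w' (x - 1) (y + 1) z
            rw [if_neg (by simp)] at h2
            simp [toCubicLoop, go_w, hpn, hps, h2]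
      · obtain ⟨he, hw⟩ := not_or.mp hew
        rw [if_neg hew, List.nil_append]
        have h2 := ih c x y z
        rw [if_neg (by tauto)] at h2
        by_cases hp : p = 'n' ∨ p = 's'
        · rcases hp with rfl | rfl <;> simp [toCubicLoop, hs, hn, he, hw, h2]
        · obtain ⟨hpn, hps⟩ := not_or.mp hp
          simp [toCubicLoop, hs, hn, he, hw, hpn, hps, h2]

-- ===== VERDICT (by name: the statement is the Claim_ definition above) =====
theorem to_cubic_spec : Claim_equal_to_cubic := by
  intro l _
  unfold Spec_to_cubic to_cubic to_cubic_alt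
  have h := pv_loop_eq l.toList ' ' 0 0 0
  rw [if_neg (by simp)] at h
  rw [h]
  have : pvToksFrom ' ' l.toList = toCubicToks l := rfl
  rw [this]
  simp [pvVal]
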